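-- pv_equiv track=rewrite | github.com/KwonJuHwan/CodingTest | Programmers_Level_3/최고의 집합.py | solution
-- ===== SOURCE A (Python) =====
-- def solution(n, s):
--     answer = []
--     if s < n:
--         return [-1]
--     min_s = s // n
--     ss = [min_s for _ in range(n)]
--     remain_s = s - min_s * n
--
--     for i in range(remain_s):
--         ss[i] += 1
--     ss.sort()
--     answer = ss
--
--     return answer
-- ===== SOURCE B (Python) =====
-- def solution(n, s):
--     if s < n:
--         return [-1]
--     answer = []
--     rem = s
--     for i in range(n, 0, -1):
--         x = rem // i
--         answer.append(x)
--         rem -= x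
--     return answer
-- ===== Notes on version B (the rewrite author's own statement) =====
-- stated objective: alternative
-- what changed: B is a single greedy pass that never computes the remainder: counting i from n down to 1 it takes x = rem // i, appends it and subtracts it, emitting the sorted answer directly with no per-index increment loop and no sort.
import Mathlib
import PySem

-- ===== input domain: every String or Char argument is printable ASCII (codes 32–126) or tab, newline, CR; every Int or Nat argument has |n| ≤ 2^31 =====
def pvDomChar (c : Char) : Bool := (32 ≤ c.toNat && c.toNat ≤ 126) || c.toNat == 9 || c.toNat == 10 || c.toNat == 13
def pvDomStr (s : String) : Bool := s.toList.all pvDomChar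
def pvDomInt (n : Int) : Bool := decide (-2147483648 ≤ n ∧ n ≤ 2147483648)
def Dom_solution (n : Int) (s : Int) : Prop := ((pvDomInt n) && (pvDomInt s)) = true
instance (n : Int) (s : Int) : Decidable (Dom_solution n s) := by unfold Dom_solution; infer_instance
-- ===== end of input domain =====

-- B replaces A's fill/increment/sort with a single greedy countdown pass
-- (x = rem // i for i = n..1), emitting the sorted answer directly; return-value equivalence.


-- ===== PORT A =====
def solution (n : Int) (s : Int) : List Int :=
  if s < n then [-1]
  else
    let min_s := PySem.Int.floordiv s n
    let ss := (PySem.List.pyRange 0 n 1).map (fun _ => min_s)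
    let remain_s := s - min_s * n
    let ss := (PySem.List.pyRange 0 remain_s 1).foldl
      (fun acc i => acc.set i.toNat (acc.getD i.toNat 0 + 1)) ss
    PySem.List.sorted ss (fun x => x) false

-- ===== PORT B =====
def solution_alt (n : Int) (s : Int) : List Int :=
  if s < n then [-1]
  else
    let st := (PySem.List.pyRange n 0 (-1)).foldl
      (fun (p : List Int × Int) i =>
        let x := PySem.Int.floordiv p.2 i
        (p.1 ++ [x], p.2 - x)) ([], s)
    st.1

-- ===== PRECONDITION & SPEC =====
-- Pre_ excludes only n = 0 with s ≥ 0, where Python A raises ZeroDivisionError (s // n).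
def Pre_solution (n : Int) (s : Int) : Prop := n ≠ 0 ∨ s < n
instance (n : Int) (s : Int) : Decidable (Pre_solution n s) := by unfold Pre_solution; infer_instance
def pvWitness_solution : Int × Int := (5, 7)

def Spec_solution (n : Int) (s : Int) (out : List Int) : Prop := out = solution_alt n s
instance (n : Int) (s : Int) (out : List Int) : Decidable (Spec_solution n s out) := by unfold Spec_solution; infer_instance

-- ===== CLAIM (what is proved, stated in full; the proofs are below) =====
def Claim_equal_solution : Prop := ∀ (n : Int) (s : Int), Dom_solution n s → Pre_solution n s → Spec_solution n s (solution n s)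

-- ===== LEMMAS AND PROOFS =====

-- A's increment loop over range(k) turns the first k copies of q into q+1.
lemma loop_incr (q : Int) : ∀ (k m : Nat), k ≤ m →
    (PySem.List.pyRange 0 (k : Int) 1).foldl
      (fun acc i => acc.set i.toNat (acc.getD i.toNat 0 + 1)) (List.replicate m q)
    = List.replicate k (q + 1) ++ List.replicate (m - k) q := by
  intro k
  induction k with
  | zero => intro m _; simp [PySem.List.pyRange_one_eq_nil]
  | succ k ih =>
    intro m hm
    have hk : (((k + 1 : Nat)) : Int) = (k : Int) + 1 := by push_cast; ring
    rw [hk, PySem.List.pyRange_one_succ_right (by positivity), List.foldl_append,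
        ih m (by omega)]
    simp only [List.foldl_cons, List.foldl_nil]
    have hlen : (List.replicate k (q + 1)).length = k := List.length_replicate
    have hmk : m - k = (m - (k + 1)) + 1 := by omega
    rw [hmk]
    have hget : (List.replicate k (q + 1) ++ List.replicate (m - (k+1) + 1) q).getD ((k : Int)).toNat 0 = q := by
      simp [List.getD]
    rw [hget]
    have : (List.replicate k (q + 1) ++ List.replicate (m - (k+1) + 1) q).set ((k : Int)).toNat (q + 1)
        = List.replicate (k + 1) (q + 1) ++ List.replicate (m - (k + 1)) q := by
      simp only [Int.toNat_natCast, List.replicate_succ]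
      rw [List.set_append_right _ _ (by simp), hlen]
      simp only [Nat.sub_self, List.set_cons_zero]
      rw [← List.singleton_append, ← List.append_assoc, ← List.replicate_succ',
          List.replicate_succ, List.cons_append]
    rw [this]

-- sorting r copies of q+1 followed by b copies of q yields the b copies of q first
lemma sorted_two_blocks (q : Int) (a b : Nat) :
    PySem.List.sorted (List.replicate a (q + 1) ++ List.replicate b q) (fun x => x) false
    = List.replicate b q ++ List.replicate a (q + 1) := by
  apply PySem.List.eq_of_perm_of_pairwise_le_of_injective (fun x => x) (fun _ _ h => h)
  · exact (PySem.List.sorted_perm _ _ _).trans List.perm_append_comm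
  · exact PySem.List.sorted_pairwise _ _
  · apply List.pairwise_append.2
    refine ⟨List.pairwise_replicate.2 (by simp), List.pairwise_replicate.2 (by simp), ?_⟩
    intro x hx y hy
    rw [List.eq_of_mem_replicate hx, List.eq_of_mem_replicate hy]
    omega

-- B's greedy countdown loop: from remaining k*q + r (0 ≤ r < k) it emits
-- (k - r) copies of q followed by r copies of q + 1.
lemma greedy_loop : ∀ (k : Nat) (q r : Int) (acc : List Int), 0 ≤ r → r < k →
    (PySem.List.pyRange (k : Int) 0 (-1)).foldl
      (fun (p : List Int × Int) i =>
        let x := PySem.Int.floordiv p.2 i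
        (p.1 ++ [x], p.2 - x)) (acc, (k : Int) * q + r)
    = (acc ++ List.replicate (k - r.toNat) q ++ List.replicate r.toNat (q + 1), 0) := by
  intro k
  induction k with
  | zero => intro q r acc h0 h1; omega
  | succ k ih =>
    intro q r acc h0 h1
    have hkpos : (0 : Int) < ((k + 1 : Nat) : Int) := by positivity
    rw [PySem.List.pyRange_neg_one_cons hkpos]
    simp only [List.foldl_cons]
    have hx : PySem.Int.floordiv (((k + 1 : Nat) : Int) * q + r) ((k + 1 : Nat) : Int) = q := by
      refine (PySem.Int.floordiv_eq_iff_of_pos hkpos).2 ⟨?_, ?_⟩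
      · rw [mul_comm]; linarith
      · rw [add_mul, one_mul, mul_comm q]; linarith
    rw [hx]
    have hcast : ((k + 1 : Nat) : Int) - 1 = (k : Int) := by push_cast; ring
    rw [hcast]
    have hrem : ((k + 1 : Nat) : Int) * q + r - q = (k : Int) * q + r := by push_cast; ring
    by_cases hr : r < k
    · have := ih q r (acc ++ [q]) h0 (by exact_mod_cast hr)
      simp only [hrem, this]
      have h1 : k + 1 - r.toNat = (k - r.toNat) + 1 := by omega
      rw [h1, List.replicate_succ, List.append_assoc, List.append_assoc]
      simp
    · -- r = k
      have hrk : r = (k : Int) := by push_cast at h1; omega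
      by_cases hk0 : k = 0
      · subst hk0
        have hr0 : r = 0 := by simpa using hrk
        rw [hrem, hr0]
        rw [PySem.List.pyRange_neg_one_eq_nil (by norm_num)]
        simp
      · have hrem2 : (k : Int) * q + r = (k : Int) * (q + 1) + 0 := by rw [hrk]; ring
        have := ih (q + 1) 0 (acc ++ [q]) le_rfl (by omega)
        rw [hrem, hrem2, this]
        have h2 : r.toNat = k := by omega
        simp [h2]

-- ===== VERDICT (by name: the statement is the Claim_ definition above) =====
theorem solution_spec : Claim_equal_solution := by
  intro n s _ hpre
  unfold Spec_solution solution solution_alt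
  by_cases hlt : s < n
  · simp [hlt]
  · simp only [hlt, if_false]
    have hn0 : n ≠ 0 := by rcases hpre with h | h; exacts [h, absurd h hlt]
    have hrem : s - PySem.Int.floordiv s n * n = PySem.Int.mod s n := by
      have := PySem.Int.floordiv_mul_add_mod s n; omega
    set q := PySem.Int.floordiv s n with hq
    set r := PySem.Int.mod s n with hr
    rw [hrem]
    have hmap : (PySem.List.pyRange 0 n 1).map (fun _ => q) = List.replicate n.toNat q := by
      rw [List.map_const']
      simp [PySem.List.length_pyRange_one]
    rw [hmap]
    rcases lt_or_gt_of_ne hn0 with hneg | hpos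
    · -- n < 0: every list involved is empty
      obtain ⟨hr1, hr2⟩ := PySem.Int.mod_neg_bounds s hneg
      rw [PySem.List.pyRange_one_eq_nil (by omega),
          PySem.List.pyRange_neg_one_eq_nil (by omega)]
      simp only [List.foldl_nil]
      have h1 : n.toNat = 0 := by omega
      rw [h1]
      simp [PySem.List.sorted]
    · -- n > 0
      have hr0 : 0 ≤ r := PySem.Int.mod_nonneg s hpos
      have hrn : r < n := PySem.Int.mod_lt s hpos
      have hrc : (r.toNat : Int) = r := Int.toNat_of_nonneg hr0
      have hnc : (n.toNat : Int) = n := Int.toNat_of_nonneg (le_of_lt hpos)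
      rw [← hrc, loop_incr q r.toNat n.toNat (by omega), sorted_two_blocks]
      have hs : s = (n.toNat : Int) * q + r := by
        rw [hnc, mul_comm]
        have := PySem.Int.floordiv_mul_add_mod s n
        omega
      rw [← hnc]
      conv_rhs => rw [hs]
      rw [greedy_loop n.toNat q r [] hr0 (by omega)]
      simp
      omega
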